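-- pv_equiv track=rewrite | github.com/BathuPadmanabhan/Design-and-Analysis-of-Algorithm | Assignment - 9/DeleteSequenceElement.py | min_seeds
-- ===== SOURCE A (Python) =====
-- def min_seeds(nums, space):
--     nums.sort()
--     max_targets = 0
--     min_seed = float('inf')
--
--     for i in range(len(nums)):
--         targets = 1
--         for j in range(i+1, len(nums)):
--             if nums[j] <= nums[i] + (j-i) * space:
--                 targets += 1
--         if targets > max_targets:
--             max_targets = targets
--             min_seed = nums[i]
--
--     return min_seed
-- ===== SOURCE B (Python) =====
-- def _bisect_right(a, x):
--     lo, hi = 0, len(a)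
--     while lo < hi:
--         mid = (lo + hi) // 2
--         if a[mid] <= x:
--             lo = mid + 1
--         else:
--             hi = mid
--     return lo
--
--
-- def min_seeds(nums, space):
--     s = sorted(nums)
--     n = len(s)
--     b = [s[k] - k * space for k in range(n)]
--     suffix = []          # sorted list of the shifted values seen so far (a suffix of b)
--     cnt = []
--     for i in range(n - 1, -1, -1):
--         p = _bisect_right(suffix, b[i])
--         suffix.insert(p, b[i])
--         cnt.append(p)
--     cnt.reverse()
--     best, bestc = 0, -1
--     for i in range(n):
--         if cnt[i] > bestc:
--             best, bestc = i, cnt[i]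
--     return s[best]
-- ===== Notes on version B (the rewrite author's own statement) =====
-- stated objective: faster
-- what changed: Instead of re-scanning the suffix for every i, B shifts to b[k]=sorted(nums)[k]-k*space and sweeps once from the right maintaining a sorted list of the suffix values, getting each count as a hand-written binary-search (bisect_right) insertion position, then takes the first argmax in a final pass; A sorts nums in place while B does not (return values only are compared).
-- outside the precondition, e.g. on min_seeds([], 0): A returns inf, B raises IndexError
import Mathlib
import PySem

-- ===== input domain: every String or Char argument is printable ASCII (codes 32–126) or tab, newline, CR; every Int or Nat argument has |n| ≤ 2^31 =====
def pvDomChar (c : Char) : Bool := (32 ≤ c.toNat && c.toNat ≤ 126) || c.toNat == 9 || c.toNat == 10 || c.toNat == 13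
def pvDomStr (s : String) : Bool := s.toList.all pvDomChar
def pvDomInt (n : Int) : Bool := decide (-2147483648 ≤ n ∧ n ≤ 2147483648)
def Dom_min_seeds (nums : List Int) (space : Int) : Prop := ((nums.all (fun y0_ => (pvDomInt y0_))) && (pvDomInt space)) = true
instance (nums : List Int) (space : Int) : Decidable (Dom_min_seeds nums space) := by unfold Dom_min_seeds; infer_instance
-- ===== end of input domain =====

-- B replaces A's per-index rescan of the suffix by one right-to-left sweep over the shifted values
-- b[k] = sorted(nums)[k] - k*space, maintaining a sorted list of the suffix and reading each count off a
-- hand-written binary-search insertion position, then a final first-argmax pass. A sorts nums in place;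
-- the equivalence proved here is about the RETURN value only (B does not mutate its argument).

-- ===== PORT A =====
def min_seeds (nums : List Int) (space : Int) : Int :=
  let s := PySem.List.sorted nums (fun x => x) false
  let n : Int := s.length
  let res := (PySem.List.pyRange 0 n 1).foldl (fun st i =>
      let targets := (PySem.List.pyRange (i+1) n 1).foldl
        (fun t j => if PySem.List.pyGetD s j 0 ≤ PySem.List.pyGetD s i 0 + (j - i) * space then t + 1 else t)
        (1 : Int)
      if targets > st.1 then (targets, some (PySem.List.pyGetD s i 0)) else st)
    ((0 : Int), (none : Option Int))
  res.2.getD 0   -- min_seed; the initial float('inf') is only returned on the empty list, excluded by Pre_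

-- ===== PORT B =====
-- _bisect_right(a, x): hand-written in Source B (A's module imports nothing), ported step for step
def pyBisectR (a : List Int) (x : Int) (lo hi : Int) : Int :=
  if h : lo < hi then
    let mid := PySem.Int.floordiv (lo + hi) 2
    if PySem.List.pyGetD a mid 0 ≤ x then pyBisectR a x (mid + 1) hi
    else pyBisectR a x lo mid
  else lo
termination_by (hi - lo).toNat
decreasing_by
  · rw [PySem.Int.floordiv_eq_ediv_of_pos (by omega : (0:Int) < 2)]; omega
  · rw [PySem.Int.floordiv_eq_ediv_of_pos (by omega : (0:Int) < 2)]; omega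

def min_seeds_alt (nums : List Int) (space : Int) : Int :=
  let s := PySem.List.sorted nums (fun x => x) false
  let n : Int := s.length
  let b := (PySem.List.pyRange 0 n 1).map (fun k => PySem.List.pyGetD s k 0 - k * space)
  let pr := (PySem.List.pyRange (n - 1) (-1) (-1)).foldl
    (fun st i =>
      let p := pyBisectR st.1 (PySem.List.pyGetD b i 0) 0 (st.1.length : Int)
      (PySem.List.insert st.1 p (PySem.List.pyGetD b i 0), st.2 ++ [p]))
    (([] : List Int), ([] : List Int))
  let cnt := pr.2.reverse
  let res := (PySem.List.pyRange 0 n 1).foldl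
    (fun st i => if PySem.List.pyGetD cnt i 0 > st.2 then (i, PySem.List.pyGetD cnt i 0) else st)
    ((0 : Int), (-1 : Int))
  PySem.List.pyGetD s res.1 0

-- ===== PRECONDITION & SPEC =====
-- Pre_ excludes only the empty list, on which A returns float('inf') (not an int) and B's s[best] raises IndexError.
def Pre_min_seeds (nums : List Int) (space : Int) : Prop := nums ≠ []
instance (nums : List Int) (space : Int) : Decidable (Pre_min_seeds nums space) := by unfold Pre_min_seeds; infer_instance
def pvWitness_min_seeds : List Int × Int := ([3, 1, 5, 2], 2)
def Spec_min_seeds (nums : List Int) (space : Int) (out : Int) : Prop := out = min_seeds_alt nums space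
instance (nums : List Int) (space : Int) (out : Int) : Decidable (Spec_min_seeds nums space out) := by unfold Spec_min_seeds; infer_instance

-- ===== CLAIM (what is proved, stated in full; the proofs are below) =====
def Claim_equal_min_seeds : Prop := ∀ (nums : List Int) (space : Int), Dom_min_seeds nums space → Pre_min_seeds nums space → Spec_min_seeds nums space (min_seeds nums space)

-- ===== LEMMAS AND PROOFS =====

-- proof-only abbreviations: the shifted array, B's count at index i, A's inner-loop value at index i
def pvb (s : List Int) (space : Int) : List Int :=
  (PySem.List.pyRange 0 (s.length : Int) 1).map (fun k => PySem.List.pyGetD s k 0 - k * space)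

def pvC (s : List Int) (space : Int) (i : Int) : Int :=
  (((pvb s space).drop (i+1).toNat).countP
    (fun v => decide (v ≤ PySem.List.pyGetD (pvb s space) i 0)) : Int)

def pvT (s : List Int) (space : Int) (i : Int) : Int :=
  (PySem.List.pyRange (i+1) (s.length : Int) 1).foldl
    (fun t j => if PySem.List.pyGetD s j 0 ≤ PySem.List.pyGetD s i 0 + (j - i) * space then t + 1 else t)
    (1 : Int)

theorem pvb_len (s : List Int) (space : Int) : (pvb s space).length = s.length := by
  unfold pvb; simp [PySem.List.length_pyRange_one]

theorem pvb_get (s : List Int) (space : Int) (i : Int) (hi : 0 ≤ i) (hn : i < (s.length : Int)) :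
    PySem.List.pyGetD (pvb s space) i 0 = PySem.List.pyGetD s i 0 - i * space := by
  unfold pvb; rw [PySem.List.pyGetD_map_pyRange_of_nonneg _ _ _ _ hi hn]

theorem pvC_nonneg (s : List Int) (space : Int) (i : Int) : 0 ≤ pvC s space i := by
  unfold pvC; positivity

-- A's inner loop at index i counts exactly B's count, plus the seed itself
theorem T_eq (s : List Int) (space : Int) (i : Int) (hi : 0 ≤ i) (hn : i < (s.length : Int)) :
    pvT s space i = pvC s space i + 1 := by
  unfold pvT pvC
  rw [PySem.List.foldl_ite_add_one]
  have hdrop : (pvb s space).drop (i+1).toNat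
      = (PySem.List.pyRange (i+1) ((pvb s space).length : Int) 1).map
          (fun j => PySem.List.pyGetD (pvb s space) j 0) :=
    (PySem.List.map_pyGetD_pyRange' (pvb s space) 0 (by omega : (0:Int) ≤ i + 1)).symm
  have hcnt : ((pvb s space).drop (i+1).toNat).countP
        (fun v => decide (v ≤ PySem.List.pyGetD (pvb s space) i 0))
      = (PySem.List.pyRange (i+1) (s.length : Int) 1).countP
        (fun j => decide (PySem.List.pyGetD s j 0 ≤ PySem.List.pyGetD s i 0 + (j - i) * space)) := by
    rw [hdrop, List.countP_map, pvb_len]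
    refine List.countP_congr ?_
    intro j hj
    rw [PySem.List.mem_pyRange_one] at hj
    have h1 := pvb_get s space j (by omega) hj.2
    have h2 := pvb_get s space i hi hn
    have hexp : (j - i) * space = j * space - i * space := by ring
    simp only [Function.comp_apply, h1, h2]
    simp only [decide_eq_true_eq]
    constructor <;> intro h <;> linarith
  rw [hcnt]
  omega

-- in a sorted list, the first countP(≤x) elements are ≤ x and the rest are > x
theorem sorted_split (S : List Int) (x : Int) (hs : S.Pairwise (· ≤ ·)) :
    (∀ y ∈ S.take (S.countP (fun v => decide (v ≤ x))), y ≤ x) ∧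
    (∀ y ∈ S.drop (S.countP (fun v => decide (v ≤ x))), x < y) := by
  induction S with
  | nil => simp
  | cons a t ih =>
    rcases List.pairwise_cons.mp hs with ⟨ha, ht⟩
    by_cases hax : a ≤ x
    · rw [List.countP_cons_of_pos (by simpa using hax)]
      have := ih ht
      constructor
      · intro y hy
        rw [List.take_succ_cons] at hy
        rcases List.mem_cons.mp hy with h | h
        · exact h ▸ hax
        · exact this.1 y h
      · intro y hy
        rw [List.drop_succ_cons] at hy
        exact this.2 y hy
    · have hz : t.countP (fun v => decide (v ≤ x)) = 0 := by
        rw [List.countP_eq_zero]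
        intro y hy
        simp only [decide_eq_true_eq]
        intro hyx
        exact hax (le_trans (ha y hy) hyx)
      rw [List.countP_cons_of_neg (by simpa using hax), hz]
      refine ⟨by simp, ?_⟩
      intro y hy
      simp only [List.drop_zero] at hy
      rcases List.mem_cons.mp hy with h | h
      · omega
      · have := ha y h; omega
  
-- the hand-written binary search returns the count of elements ≤ x in a sorted list
theorem pyBisectR_eq (S : List Int) (x : Int) (hs : S.Pairwise (· ≤ ·)) :
    ∀ (fuel : Nat) (lo hi : Int), (hi - lo).toNat ≤ fuel → 0 ≤ lo → lo ≤ hi → hi ≤ (S.length : Int) →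
    (∀ y ∈ S.take lo.toNat, y ≤ x) → (∀ y ∈ S.drop hi.toNat, x < y) →
    pyBisectR S x lo hi = (S.countP (fun v => decide (v ≤ x)) : Int) := by
  intro fuel
  induction fuel with
  | zero =>
    intro lo hi hf h0 hlh hhl hlo hhi
    have : lo = hi := by omega
    subst this
    rw [pyBisectR, dif_neg (by omega)]
    have hsplit := sorted_split S x hs
    have hc : S.countP (fun v => decide (v ≤ x)) = lo.toNat := by
      have h1 : S = S.take lo.toNat ++ S.drop lo.toNat := (List.take_append_drop _ _).symm
      have h2 : S.countP (fun v => decide (v ≤ x))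
          = (S.take lo.toNat).countP (fun v => decide (v ≤ x))
            + (S.drop lo.toNat).countP (fun v => decide (v ≤ x)) := by
        conv_lhs => rw [h1]
        rw [List.countP_append]
      have h3 : (S.take lo.toNat).countP (fun v => decide (v ≤ x)) = (S.take lo.toNat).length :=
        List.countP_eq_length.mpr (fun y hy => by simpa using hlo y hy)
      have h4 : (S.drop lo.toNat).countP (fun v => decide (v ≤ x)) = 0 :=
        List.countP_eq_zero.mpr (fun y hy => by simpa using not_le.mpr (hhi y hy))
      rw [h2, h3, h4, List.length_take]
      omega
    rw [hc]
    omega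
  | succ fuel ih =>
    intro lo hi hf h0 hlh hhl hlo hhi
    by_cases hlt : lo < hi
    · rw [pyBisectR, dif_pos hlt]
      simp only []
      have hmid : PySem.Int.floordiv (lo + hi) 2 = (lo + hi) / 2 :=
        PySem.Int.floordiv_eq_ediv_of_pos (by omega)
      set mid := PySem.Int.floordiv (lo + hi) 2 with hmiddef
      have hb1 : lo ≤ mid := by rw [hmid]; omega
      have hb2 : mid < hi := by rw [hmid]; omega
      have hmlen : mid.toNat < S.length := by omega
      have hget : PySem.List.pyGetD S mid 0 = S[mid.toNat] :=
        PySem.List.pyGetD_eq_getElem S 0 (by omega) (by omega)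
      have hmono := List.pairwise_iff_getElem.mp hs
      by_cases hcmp : PySem.List.pyGetD S mid 0 ≤ x
      · rw [if_pos hcmp]
        refine ih (mid + 1) hi (by omega) (by omega) (by omega) hhl ?_ hhi
        intro y hy
        rcases List.mem_take_iff_getElem.mp hy with ⟨j, hj, rfl⟩
        have hjm : j ≤ mid.toNat := by omega
        have hjl : j < S.length := by omega
        have : S[j] ≤ S[mid.toNat] := by
          rcases Nat.lt_or_ge j mid.toNat with h | h
          · exact hmono j mid.toNat hjl hmlen h
          · have : j = mid.toNat := by omega
            subst this; exact le_refl _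
        calc S[j] ≤ S[mid.toNat] := this
          _ ≤ x := by rw [← hget]; exact hcmp
      · rw [if_neg hcmp]
        refine ih lo mid (by omega) (by omega) (by omega) (by omega) hlo ?_
        intro y hy
        rcases List.mem_drop_iff_getElem.mp hy with ⟨j, hj, rfl⟩
        have : S[mid.toNat] ≤ S[mid.toNat + j] := by
          rcases Nat.eq_zero_or_pos j with h | h
          · subst h; exact le_refl _
          · exact hmono mid.toNat (mid.toNat + j) hmlen (by omega) (by omega)
        have hxm : x < S[mid.toNat] := by
          rw [← hget]; omega
        omega
    · exact ih lo hi (by omega) h0 hlh hhl hlo hhi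

-- B's backward sweep: the sorted buffer holds exactly the processed suffix of pvb, and the count list
-- records pvC in descending index order
theorem loopB (s : List Int) (space : Int) :
    ∀ (fuel : Nat) (i : Int), 0 ≤ i → (((s.length : Int)) - i).toNat ≤ fuel → i ≤ (s.length : Int) →
    ((PySem.List.pyRange i (s.length : Int) 1).foldr
        (fun idx st =>
          let p := pyBisectR st.1 (PySem.List.pyGetD (pvb s space) idx 0) 0 (st.1.length : Int)
          (PySem.List.insert st.1 p (PySem.List.pyGetD (pvb s space) idx 0), st.2 ++ [p]))
        (([] : List Int), ([] : List Int))).1.Pairwise (· ≤ ·) ∧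
    ((PySem.List.pyRange i (s.length : Int) 1).foldr
        (fun idx st =>
          let p := pyBisectR st.1 (PySem.List.pyGetD (pvb s space) idx 0) 0 (st.1.length : Int)
          (PySem.List.insert st.1 p (PySem.List.pyGetD (pvb s space) idx 0), st.2 ++ [p]))
        (([] : List Int), ([] : List Int))).1.Perm ((pvb s space).drop i.toNat) ∧
    ((PySem.List.pyRange i (s.length : Int) 1).foldr
        (fun idx st =>
          let p := pyBisectR st.1 (PySem.List.pyGetD (pvb s space) idx 0) 0 (st.1.length : Int)
          (PySem.List.insert st.1 p (PySem.List.pyGetD (pvb s space) idx 0), st.2 ++ [p]))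
        (([] : List Int), ([] : List Int))).2
      = ((PySem.List.pyRange i (s.length : Int) 1).map (fun j => pvC s space j)).reverse := by
  intro fuel
  induction fuel with
  | zero =>
    intro i h0 hf hle
    have : i = (s.length : Int) := by omega
    subst this
    rw [PySem.List.pyRange_one_eq_nil (le_refl _)]
    refine ⟨by simp, ?_, by simp⟩
    simp only [List.foldr_nil]
    have : (pvb s space).drop (s.length : Int).toNat = [] := by
      rw [List.drop_eq_nil_iff, pvb_len]; omega
    rw [this]
  | succ fuel ih =>
    intro i h0 hf hle
    by_cases hlt : i < (s.length : Int)
    · rw [PySem.List.pyRange_one_cons hlt]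
      simp only [List.foldr_cons]
      obtain ⟨hS, hP, hC⟩ := ih (i+1) (by omega) (by omega) (by omega)
      set st := ((PySem.List.pyRange (i+1) (s.length : Int) 1).foldr
        (fun idx st =>
          let p := pyBisectR st.1 (PySem.List.pyGetD (pvb s space) idx 0) 0 (st.1.length : Int)
          (PySem.List.insert st.1 p (PySem.List.pyGetD (pvb s space) idx 0), st.2 ++ [p]))
        (([] : List Int), ([] : List Int))) with hst
      set v := PySem.List.pyGetD (pvb s space) i 0 with hv
      set c := st.1.countP (fun w => decide (w ≤ v)) with hcdef
      have hp : pyBisectR st.1 v 0 (st.1.length : Int) = (c : Int) :=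
        pyBisectR_eq st.1 v hS st.1.length 0 (st.1.length : Int) (by omega) (by omega)
          (by omega) (by omega) (by simp) (by simp)
      have hcle : c ≤ st.1.length := List.countP_le_length
      have hins : PySem.List.insert st.1 (c : Int) v = st.1.take c ++ v :: st.1.drop c :=
        PySem.List.insert_natCast st.1 c v hcle
      have hib : i < ((pvb s space).length : Int) := by rw [pvb_len]; exact hlt
      have hdropi : (pvb s space).drop i.toNat = v :: (pvb s space).drop (i.toNat + 1) := by
        rw [List.drop_eq_getElem_cons (by omega : i.toNat < (pvb s space).length)]
        congr 1
        rw [hv, PySem.List.pyGetD_eq_getElem (pvb s space) 0 h0 hib]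
      have hi1 : (i+1).toNat = i.toNat + 1 := by omega
      have hsplit := sorted_split st.1 v hS
      refine ⟨?_, ?_, ?_⟩
      · -- sortedness of the new buffer
        simp only [hp, hins]
        rw [List.pairwise_append]
        refine ⟨hS.sublist (List.take_sublist _ _), ?_, ?_⟩
        · rw [List.pairwise_cons]
          refine ⟨fun y hy => le_of_lt (hsplit.2 y hy), hS.sublist (List.drop_sublist _ _)⟩
        · intro a ha b hb
          rcases List.mem_cons.mp hb with h | h
          · exact h ▸ hsplit.1 a ha
          · exact le_of_lt (lt_of_le_of_lt (hsplit.1 a ha) (hsplit.2 b h))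
      · -- permutation with the suffix of pvb
        simp only [hp, hins]
        have h1 : (st.1.take c ++ v :: st.1.drop c).Perm (v :: st.1) := by
          have := (List.perm_middle (a := v) (l₁ := st.1.take c) (l₂ := st.1.drop c))
          rwa [List.take_append_drop] at this
        have h2 : (v :: st.1).Perm ((pvb s space).drop i.toNat) := by
          rw [hdropi]
          refine List.Perm.cons v ?_
          rw [← hi1]; exact hP
        exact h1.trans h2
      · -- the count list
        simp only [hp, hC]
        have hcv : (c : Int) = pvC s space i := by
          unfold pvC
          congr 1
          exact hcdef.trans (hP.countP_eq _)
        rw [List.map_cons, List.reverse_cons, hcv]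
    · exact ih i h0 (by omega) hle

-- first-argmax loops agree: A threads (best targets, best seed), B threads (best index, best count)
theorem loop_rel (s : List Int) (space : Int) :
    ∀ (l : List Int) (bi : Int),
    (∀ i ∈ l, pvT s space i = pvC s space i + 1) →
    (l.foldl (fun st i =>
        let targets := pvT s space i
        if targets > st.1 then (targets, some (PySem.List.pyGetD s i 0)) else st)
      (pvC s space bi + 1, some (PySem.List.pyGetD s bi 0))).2
    = some (PySem.List.pyGetD s ((l.foldl (fun st i =>
        if pvC s space i > st.2 then (i, pvC s space i) else st) (bi, pvC s space bi)).1) 0) := by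
  intro l
  induction l with
  | nil => intro bi _; rfl
  | cons i l ih =>
    intro bi h
    have hT : pvT s space i = pvC s space i + 1 := h i (List.mem_cons_self ..)
    have hrest : ∀ j ∈ l, pvT s space j = pvC s space j + 1 :=
      fun j hj => h j (List.mem_cons_of_mem _ hj)
    simp only [List.foldl_cons, hT]
    by_cases hc : pvC s space i > pvC s space bi
    · rw [if_pos (by omega), if_pos hc]
      exact ih i hrest
    · rw [if_neg (by omega), if_neg hc]
      exact ih bi hrest

-- ===== VERDICT (by name: the statement is the Claim_ definition above) =====
theorem min_seeds_spec : Claim_equal_min_seeds := by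
  intro nums space _ hpre
  unfold Spec_min_seeds
  simp only [min_seeds, min_seeds_alt]
  set s := PySem.List.sorted nums (fun x => x) false with hs
  have hsort : s.Pairwise (· ≤ ·) := PySem.List.sorted_pairwise nums (fun x => x) |>.imp (fun h => h)
  have hlen : s.length = nums.length := PySem.List.length_sorted ..
  have hn : 0 < (s.length : Int) := by
    have : nums ≠ [] := hpre
    have : 0 < nums.length := List.length_pos_iff.mpr this
    omega
  -- name port-B's b as pvb
  have hbdef : ((PySem.List.pyRange 0 (s.length : Int) 1).map
      (fun k => PySem.List.pyGetD s k 0 - k * space)) = pvb s space := rfl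
  rw [hbdef]
  -- turn the countdown range into the reverse of the forward range, the foldl into a foldr
  have hrange : PySem.List.pyRange ((s.length : Int) - 1) (-1) (-1)
      = (PySem.List.pyRange 0 (s.length : Int) 1).reverse := by
    rw [PySem.List.pyRange_neg_one_eq_reverse]
    norm_num
  rw [hrange, List.foldl_reverse]
  obtain ⟨_, _, hC⟩ := loopB s space ((s.length : Int) - 0).toNat 0 (le_refl _) (le_refl _) (by omega)
  simp only [Int.toNat_zero] at hC ⊢
  rw [hC, List.reverse_reverse]
  -- the count list lookups become pvC on the range
  rw [PySem.List.foldl_congr_mem (PySem.List.pyRange 0 (s.length : Int) 1)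
    (fun st i => if PySem.List.pyGetD ((PySem.List.pyRange 0 (s.length : Int) 1).map
        (fun j => pvC s space j)) i 0 > st.2
      then (i, PySem.List.pyGetD ((PySem.List.pyRange 0 (s.length : Int) 1).map
        (fun j => pvC s space j)) i 0) else st)
    (fun st i => if pvC s space i > st.2 then (i, pvC s space i) else st)
    ((0 : Int), (-1 : Int))
    (by
      intro acc x hx
      rw [PySem.List.mem_pyRange_one] at hx
      simp only [PySem.List.pyGetD_map_pyRange_of_nonneg _ _ _ _ hx.1 hx.2])]
  -- peel index 0 on both sides
  rw [PySem.List.pyRange_one_cons hn]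
  simp only [List.foldl_cons]
  have hT0 : pvT s space 0 = pvC s space 0 + 1 := T_eq s space 0 le_rfl hn
  have hge : 0 ≤ pvC s space 0 := pvC_nonneg s space 0
  show ((PySem.List.pyRange (0+1) (s.length : Int) 1).foldl
      (fun st i => if pvT s space i > st.1 then (pvT s space i, some (PySem.List.pyGetD s i 0)) else st)
      (if pvT s space 0 > 0 then (pvT s space 0, some (PySem.List.pyGetD s 0 0))
       else ((0 : Int), (none : Option Int)))).2.getD 0
    = PySem.List.pyGetD s (((PySem.List.pyRange (0+1) (s.length : Int) 1).foldl
      (fun st i => if pvC s space i > st.2 then (i, pvC s space i) else st)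
      (if pvC s space 0 > -1 then ((0 : Int), pvC s space 0) else ((0 : Int), (-1 : Int)))).1) 0
  rw [if_pos (by omega), if_pos (by omega), hT0]
  have h := loop_rel s space (PySem.List.pyRange (0+1) (s.length : Int) 1) 0
    (fun i hi => by
      rw [PySem.List.mem_pyRange_one] at hi
      exact T_eq s space i (by omega) hi.2)
  rw [h]
  rfl
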